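-- pv_equiv track=rewrite | github.com/willtho89/Advent-of-Code-2024 | python/2024/25.py | count_valid_pairs
-- ===== SOURCE A (Python) =====
-- from typing import List, Tuple
--
-- def count_valid_pairs(lock_heights: List[List[int]], key_heights: List[List[int]], available_space: int) -> int:
--     count = 0
--     for l_heights in lock_heights:
--         for k_heights in key_heights:
--             fits = True
--             for lh, kh in zip(l_heights, k_heights):
--                 if lh + kh > available_space:
--                     fits = False
--                     break
--             if fits:
--                 count += 1
--     return count
-- ===== SOURCE B (Python) =====
-- def count_valid_pairs(lock_heights, key_heights, available_space):
--     total = 0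
--     for l in lock_heights:
--         cands = key_heights
--         for j, lh in enumerate(l):
--             limit = available_space - lh
--             cands = [k for k in cands if j >= len(k) or k[j] <= limit]
--         total += len(cands)
--     return total
-- ===== Notes on version B (the rewrite author's own statement) =====
-- stated objective: alternative
-- what changed: B flips the loop nesting: per lock it sweeps columns, narrowing one shrinking candidate list of keys by a per-column threshold filter, instead of A's per-(lock,key) inner zip scan with a break.
import Mathlib
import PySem

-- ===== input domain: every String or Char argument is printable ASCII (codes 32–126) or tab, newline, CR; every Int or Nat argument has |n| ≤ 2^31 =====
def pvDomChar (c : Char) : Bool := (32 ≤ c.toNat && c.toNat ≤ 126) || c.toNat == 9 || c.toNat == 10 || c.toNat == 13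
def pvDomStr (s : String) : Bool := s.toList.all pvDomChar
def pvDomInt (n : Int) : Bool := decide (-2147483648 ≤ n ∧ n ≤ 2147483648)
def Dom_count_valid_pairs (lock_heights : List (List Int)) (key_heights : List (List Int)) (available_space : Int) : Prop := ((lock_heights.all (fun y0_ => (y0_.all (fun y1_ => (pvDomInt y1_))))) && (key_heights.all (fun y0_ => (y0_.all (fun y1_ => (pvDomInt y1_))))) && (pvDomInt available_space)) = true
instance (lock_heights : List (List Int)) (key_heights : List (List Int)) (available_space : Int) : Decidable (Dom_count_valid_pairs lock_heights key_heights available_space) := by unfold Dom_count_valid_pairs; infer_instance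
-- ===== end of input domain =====

-- B flips the loop nesting: per lock it sweeps columns, filtering one shrinking candidate
-- list of keys by a per-column threshold, instead of A's per-(lock,key) inner zip scan (alternative, same cost).

-- ===== PORT A =====
-- the inner `for lh, kh in zip(...)` loop of A, with its break (returns the final `fits`)
def pvFits (s : Int) : List (Int × Int) → Bool
  | [] => true
  | (lh, kh) :: rest => if lh + kh > s then false else pvFits s rest

def count_valid_pairs (lock_heights : List (List Int)) (key_heights : List (List Int)) (available_space : Int) : Int :=
  lock_heights.foldl (fun count l_heights =>
    key_heights.foldl (fun count k_heights =>
      if pvFits available_space (l_heights.zip k_heights) then count + 1 else count) count) 0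

-- ===== PORT B =====
-- B's column sweep: `for j, lh in enumerate(l): cands = [k for k in cands if j >= len(k) or k[j] <= limit]`
-- (Python only indexes k[j] when j < len(k); getD j 0 is exact there)
def pvFilterCols (s : Int) : List Int → Nat → List (List Int) → List (List Int)
  | [], _, cands => cands
  | lh :: rest, j, cands =>
      pvFilterCols s rest (j + 1)
        (cands.filter (fun k => decide (j ≥ k.length) || decide (k.getD j 0 ≤ s - lh)))

def count_valid_pairs_alt (lock_heights : List (List Int)) (key_heights : List (List Int)) (available_space : Int) : Int :=
  lock_heights.foldl (fun total l =>
    total + ((pvFilterCols available_space l 0 key_heights).length : Int)) 0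

-- ===== PRECONDITION & SPEC =====
def Spec_count_valid_pairs (lock_heights : List (List Int)) (key_heights : List (List Int)) (available_space : Int) (out : Int) : Prop := out = count_valid_pairs_alt lock_heights key_heights available_space
instance (lock_heights : List (List Int)) (key_heights : List (List Int)) (available_space : Int) (out : Int) : Decidable (Spec_count_valid_pairs lock_heights key_heights available_space out) := by unfold Spec_count_valid_pairs; infer_instance

-- ===== CLAIM (what is proved, stated in full; the proofs are below) =====
def Claim_equal_count_valid_pairs : Prop := ∀ (lock_heights : List (List Int)) (key_heights : List (List Int)) (available_space : Int), Dom_count_valid_pairs lock_heights key_heights available_space → Spec_count_valid_pairs lock_heights key_heights available_space (count_valid_pairs lock_heights key_heights available_space)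

-- ===== LEMMAS AND PROOFS =====

-- one column's filter test, conjoined with fitting the remaining columns, is fitting from column j on
theorem pvStep_point (s lh : Int) (rest : List Int) (j : Nat) (k : List Int) :
    ((decide (j ≥ k.length) || decide (k.getD j 0 ≤ s - lh)) && pvFits s (rest.zip (k.drop (j + 1))))
      = pvFits s ((lh :: rest).zip (k.drop j)) := by
  by_cases h : j < k.length
  · have hd : k.drop j = k[j] :: k.drop (j + 1) := List.drop_eq_getElem_cons h
    have hgd : k.getD j 0 = k[j] := List.getD_eq_getElem k 0 h
    have hge : decide (j ≥ k.length) = false := by simp; omega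
    rw [hd, hgd, hge, Bool.false_or, List.zip_cons_cons, pvFits]
    by_cases hle : k[j] ≤ s - lh
    · have hgt : ¬ (lh + k[j] > s) := by omega
      rw [if_neg hgt, decide_eq_true hle, Bool.true_and]
    · have hgt : lh + k[j] > s := by omega
      rw [if_pos hgt]
      simp [hle]
  · have hd : k.drop j = ([] : List Int) := List.drop_eq_nil_of_le (by omega)
    have hd' : k.drop (j + 1) = ([] : List Int) := List.drop_eq_nil_of_le (by omega)
    simp [hd, hd', pvFits, Nat.le_of_not_lt h]

theorem pvFilterCols_eq (s : Int) (ls : List Int) (j : Nat) (cands : List (List Int)) :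
    pvFilterCols s ls j cands = cands.filter (fun k => pvFits s (ls.zip (k.drop j))) := by
  induction ls generalizing j cands with
  | nil => simp [pvFilterCols, pvFits]
  | cons lh rest ih =>
      rw [pvFilterCols, ih, List.filter_filter]
      exact List.filter_congr (fun k _ => by rw [Bool.and_comm]; exact pvStep_point s lh rest j k)

theorem pvInner (s : Int) (l : List Int) (keys : List (List Int)) (c : Int) :
    keys.foldl (fun count k => if pvFits s (l.zip k) then count + 1 else count) c
      = c + ((keys.filter (fun k => pvFits s (l.zip k))).length : Int) := by
  induction keys generalizing c with
  | nil => simp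
  | cons k ks ih =>
      by_cases h : pvFits s (l.zip k) = true
      · simp [List.foldl_cons, h, ih]; ring
      · simp [List.foldl_cons, h, ih]

-- ===== VERDICT (by name: the statement is the Claim_ definition above) =====
theorem count_valid_pairs_spec : Claim_equal_count_valid_pairs := by
  intro locks keys s _
  unfold Spec_count_valid_pairs count_valid_pairs count_valid_pairs_alt
  have hf : (fun (count : Int) (l : List Int) =>
        keys.foldl (fun count k => if pvFits s (l.zip k) then count + 1 else count) count)
      = (fun (total : Int) (l : List Int) =>
        total + ((pvFilterCols s l 0 keys).length : Int)) := by
    funext c l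
    rw [pvInner, pvFilterCols_eq]
    simp
  rw [hf]
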